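-- pv_equiv track=rewrite | github.com/DavNej/Chatbot | boto.py | heartbroke
-- ===== SOURCE A (Python) =====
-- def heartbroke(message):
--     negation = ["don't", "dont", "doesn't", "no", "not", "doesnt", "never"]
--     love = ["like", "love"]
--     hate = ["hate", "hates"]
--
--     if any(x in negation for x in message):
--         answer =  any(x in love for x in message) and "you" in message
--     else:
--         answer =  any(x in hate for x in message) and "you" in message
--     return answer
-- ===== SOURCE B (Python) =====
-- def heartbroke(message):
--     CAT = {"don't": 1, "dont": 1, "doesn't": 1, "no": 1, "not": 1,
--            "doesnt": 1, "never": 1,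
--            "like": 2, "love": 2,
--            "hate": 4, "hates": 4,
--            "you": 8}
--     mask = 0
--     for w in message:
--         mask |= CAT.get(w, 0)
--     if mask & 1:
--         return bool(mask & 2) and bool(mask & 8)
--     return bool(mask & 4) and bool(mask & 8)
-- ===== Notes on version B (the rewrite author's own statement) =====
-- stated objective: faster
-- what changed: Replaced A's repeated any()/membership scans over separate word lists with one dictionary mapping every keyword (including 'you') to a category bit and a single pass OR-ing the bits into one mask, the answer read off the mask bits.
import Mathlib
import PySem

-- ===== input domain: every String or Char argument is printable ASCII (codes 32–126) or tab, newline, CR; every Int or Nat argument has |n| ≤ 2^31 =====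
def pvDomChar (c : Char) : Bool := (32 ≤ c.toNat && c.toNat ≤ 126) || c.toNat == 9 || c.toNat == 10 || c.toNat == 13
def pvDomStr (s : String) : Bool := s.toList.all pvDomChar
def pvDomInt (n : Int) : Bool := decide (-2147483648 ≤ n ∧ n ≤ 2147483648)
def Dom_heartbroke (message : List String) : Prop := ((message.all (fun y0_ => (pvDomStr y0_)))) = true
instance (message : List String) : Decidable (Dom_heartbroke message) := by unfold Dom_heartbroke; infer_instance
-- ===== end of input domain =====

-- B replaces A's separate scans with one keyword→category-bit dictionary and a single OR-mask pass (alternative decomposition, same cost class).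

-- ===== PORT A =====
-- Literal port of A: branch on a negation scan, then an any-scan plus "you" membership.
def pvNegation : List String := ["don't", "dont", "doesn't", "no", "not", "doesnt", "never"]
def pvLove : List String := ["like", "love"]
def pvHate : List String := ["hate", "hates"]

def heartbroke (message : List String) : Bool :=
  if message.any (fun x => pvNegation.contains x) then
    message.any (fun x => pvLove.contains x) && message.contains "you"
  else
    message.any (fun x => pvHate.contains x) && message.contains "you"

-- ===== PORT B =====
-- B: one dict keyword → category bit; one fold OR-ing bits into a mask; answer from mask bits.
def pvCat : PySem.Dict String Nat := PySem.Dict.ofList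
  [("don't", 1), ("dont", 1), ("doesn't", 1), ("no", 1), ("not", 1),
   ("doesnt", 1), ("never", 1),
   ("like", 2), ("love", 2),
   ("hate", 4), ("hates", 4),
   ("you", 8)]

def heartbroke_alt (message : List String) : Bool :=
  let mask := message.foldl (fun m w => m ||| pvCat.getD w 0) 0
  if mask &&& 1 ≠ 0 then (mask &&& 2 ≠ 0) && (mask &&& 8 ≠ 0)
  else (mask &&& 4 ≠ 0) && (mask &&& 8 ≠ 0)

-- ===== PRECONDITION & SPEC =====
def Spec_heartbroke (message : List String) (out : Bool) : Prop := out = heartbroke_alt message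
instance (message : List String) (out : Bool) : Decidable (Spec_heartbroke message out) := by unfold Spec_heartbroke; infer_instance

-- ===== CLAIM (what is proved, stated in full; the proofs are below) =====
def Claim_equal_heartbroke : Prop := ∀ (message : List String), Dom_heartbroke message → Spec_heartbroke message (heartbroke message)

-- ===== LEMMAS AND PROOFS =====

-- The category value of a single word, bit by bit.
set_option maxHeartbeats 1000000 in
theorem pvCat_testBit (w : String) :
    (pvCat.getD w 0).testBit 0 = pvNegation.contains w ∧
    (pvCat.getD w 0).testBit 1 = pvLove.contains w ∧
    (pvCat.getD w 0).testBit 2 = pvHate.contains w ∧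
    (pvCat.getD w 0).testBit 3 = (w == "you") := by
  have hmk : pvCat = PySem.Dict.mk
      [("don't", 1), ("dont", 1), ("doesn't", 1), ("no", 1), ("not", 1),
       ("doesnt", 1), ("never", 1), ("like", 2), ("love", 2),
       ("hate", 4), ("hates", 4), ("you", 8)] := rfl
  simp only [hmk, PySem.Dict.getD, PySem.Dict.get?_mk_cons,
    pvNegation, pvLove, pvHate, List.contains_cons, List.contains_nil]
  by_cases h0 : ("don't" == w) = true
  · obtain rfl := eq_of_beq h0
    decide
  have h0' : (w == "don't") = false := by rw [BEq.comm]; simpa using h0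
  simp only [if_neg h0, h0', Bool.false_or, Bool.or_false]
  by_cases h1 : ("dont" == w) = true
  · obtain rfl := eq_of_beq h1
    decide
  have h1' : (w == "dont") = false := by rw [BEq.comm]; simpa using h1
  simp only [if_neg h1, h1', Bool.false_or, Bool.or_false]
  by_cases h2 : ("doesn't" == w) = true
  · obtain rfl := eq_of_beq h2
    decide
  have h2' : (w == "doesn't") = false := by rw [BEq.comm]; simpa using h2
  simp only [if_neg h2, h2', Bool.false_or, Bool.or_false]
  by_cases h3 : ("no" == w) = true
  · obtain rfl := eq_of_beq h3
    decide
  have h3' : (w == "no") = false := by rw [BEq.comm]; simpa using h3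
  simp only [if_neg h3, h3', Bool.false_or, Bool.or_false]
  by_cases h4 : ("not" == w) = true
  · obtain rfl := eq_of_beq h4
    decide
  have h4' : (w == "not") = false := by rw [BEq.comm]; simpa using h4
  simp only [if_neg h4, h4', Bool.false_or, Bool.or_false]
  by_cases h5 : ("doesnt" == w) = true
  · obtain rfl := eq_of_beq h5
    decide
  have h5' : (w == "doesnt") = false := by rw [BEq.comm]; simpa using h5
  simp only [if_neg h5, h5', Bool.false_or, Bool.or_false]
  by_cases h6 : ("never" == w) = true
  · obtain rfl := eq_of_beq h6
    decide
  have h6' : (w == "never") = false := by rw [BEq.comm]; simpa using h6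
  simp only [if_neg h6, h6', Bool.false_or, Bool.or_false]
  by_cases h7 : ("like" == w) = true
  · obtain rfl := eq_of_beq h7
    decide
  have h7' : (w == "like") = false := by rw [BEq.comm]; simpa using h7
  simp only [if_neg h7, h7', Bool.false_or, Bool.or_false]
  by_cases h8 : ("love" == w) = true
  · obtain rfl := eq_of_beq h8
    decide
  have h8' : (w == "love") = false := by rw [BEq.comm]; simpa using h8
  simp only [if_neg h8, h8', Bool.false_or, Bool.or_false]
  by_cases h9 : ("hate" == w) = true
  · obtain rfl := eq_of_beq h9
    decide
  have h9' : (w == "hate") = false := by rw [BEq.comm]; simpa using h9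
  simp only [if_neg h9, h9', Bool.false_or, Bool.or_false]
  by_cases h10 : ("hates" == w) = true
  · obtain rfl := eq_of_beq h10
    decide
  have h10' : (w == "hates") = false := by rw [BEq.comm]; simpa using h10
  simp only [if_neg h10, h10', Bool.false_or, Bool.or_false]
  by_cases h11 : ("you" == w) = true
  · obtain rfl := eq_of_beq h11
    decide
  have h11' : (w == "you") = false := by rw [BEq.comm]; simpa using h11
  simp only [if_neg h11, h11', Bool.false_or, Bool.or_false]
  simp [PySem.Dict.get?]

-- The fold distributes over testBit.
theorem pvMask_testBit (message : List String) (m : Nat) (j : Nat) :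
    (message.foldl (fun m w => m ||| pvCat.getD w 0) m).testBit j
      = (m.testBit j || message.any (fun w => (pvCat.getD w 0).testBit j)) := by
  induction message generalizing m with
  | nil => simp
  | cons h t ih => simp [List.foldl, ih, Nat.testBit_or, Bool.or_assoc]

-- n &&& 2^j ≠ 0 is exactly testBit j.
theorem pvAnd_pow_ne (n j : Nat) : (decide (n &&& 2 ^ j ≠ 0)) = n.testBit j := by
  rw [Nat.and_two_pow]
  cases n.testBit j <;> simp

-- "you" membership equals the any-scan of bit 3.
theorem pvYou_mem (message : List String) :
    message.any (fun w => (w == "you")) = message.contains "you" := by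
  induction message with
  | nil => rfl
  | cons h t ih =>
    simp only [List.any_cons, ih, List.contains_cons]
    rw [BEq.comm]

-- ===== VERDICT (by name: the statement is the Claim_ definition above) =====
theorem heartbroke_spec : Claim_equal_heartbroke := by
  intro message _
  unfold Spec_heartbroke heartbroke heartbroke_alt
  set mask := message.foldl (fun m w => m ||| pvCat.getD w 0) 0 with hmask
  have c0 := congrArg message.any (funext fun w => (pvCat_testBit w).1)
  have c1 := congrArg message.any (funext fun w => (pvCat_testBit w).2.1)
  have c2 := congrArg message.any (funext fun w => (pvCat_testBit w).2.2.1)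
  have c3 := congrArg message.any (funext fun w => (pvCat_testBit w).2.2.2)
  have m0 : decide (mask &&& 1 ≠ 0) = message.any (fun x => pvNegation.contains x) := by
    rw [show (1:ℕ) = 2 ^ 0 from rfl, pvAnd_pow_ne, hmask, pvMask_testBit,
      Nat.zero_testBit, Bool.false_or, c0]
  have m1 : decide (mask &&& 2 ≠ 0) = message.any (fun x => pvLove.contains x) := by
    rw [show (2:ℕ) = 2 ^ 1 from rfl, pvAnd_pow_ne, hmask, pvMask_testBit,
      Nat.zero_testBit, Bool.false_or, c1]
  have m2 : decide (mask &&& 4 ≠ 0) = message.any (fun x => pvHate.contains x) := by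
    rw [show (4:ℕ) = 2 ^ 2 from rfl, pvAnd_pow_ne, hmask, pvMask_testBit,
      Nat.zero_testBit, Bool.false_or, c2]
  have m3 : decide (mask &&& 8 ≠ 0) = message.contains "you" := by
    rw [show (8:ℕ) = 2 ^ 3 from rfl, pvAnd_pow_ne, hmask, pvMask_testBit,
      Nat.zero_testBit, Bool.false_or, c3, pvYou_mem]
  by_cases hneg : mask &&& 1 ≠ 0
  · have ha : message.any (fun x => pvNegation.contains x) = true := by
      rw [← m0]; exact decide_eq_true hneg
    rw [if_pos ha, if_pos hneg, m1, m3]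
  · have ha : message.any (fun x => pvNegation.contains x) = false := by
      have hz : mask &&& 1 = 0 := not_ne_iff.mp hneg
      rw [← m0]; simp [hz]
    rw [if_neg (by simp only [ha]; exact Bool.false_ne_true), if_neg hneg, m2, m3]
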